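-- pv_equiv track=rewrite | github.com/rani-ukamble/python_coding | a34.py | encrypt_sentence
-- ===== SOURCE A (Python) =====
-- def encrypt_sentence(s):
--     vowels = "aeiouAEIOU"
--     words = s.split()
--     for i in range(len(words)):
--         if i%2==0:
--             words[i] = words[i][::-1]
--         else:
--             consonants = [char for char in words[i] if char not in vowels]
--             vowels_in_word = [char for char in words[i] if char in vowels]
--             words[i] = ''.join(consonants + vowels_in_word)
--
--     return ' '.join(words)
-- ===== SOURCE B (Python) =====
-- def encrypt_sentence(s):
--     vowels = "aeiouAEIOU"
--     out = []          # transformed words, in order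
--     rev = []          # current word's chars in order (reversed at flush; even-indexed word)
--     cons = []         # current word's consonants in order (odd-indexed word)
--     vow = []          # current word's vowels in order (odd-indexed word)
--     in_word = False
--     even = True       # parity of the current word's index
--     for ch in s:
--         if ch.isspace():
--             if in_word:
--                 out.append(''.join(reversed(rev)) if even else ''.join(cons + vow))
--                 even = not even
--                 rev, cons, vow = [], [], []
--                 in_word = False
--         else:
--             if even:
--                 rev.append(ch)
--             elif ch in vowels:
--                 vow.append(ch)
--             else:
--                 cons.append(ch)
--             in_word = True
--     if in_word:
--         out.append(''.join(reversed(rev)) if even else ''.join(cons + vow))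
--     return ' '.join(out)
-- ===== Notes on version B (the rewrite author's own statement) =====
-- stated objective: alternative
-- what changed: Replaces split()/index-loop/join with one streaming character pass over the raw string: characters are classified online into per-word accumulators (reversed prefix for even words, consonant/vowel buffers for odd words) and words are flushed at whitespace boundaries, so there is no word list, no indexing and no per-word second pass.
import Mathlib
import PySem

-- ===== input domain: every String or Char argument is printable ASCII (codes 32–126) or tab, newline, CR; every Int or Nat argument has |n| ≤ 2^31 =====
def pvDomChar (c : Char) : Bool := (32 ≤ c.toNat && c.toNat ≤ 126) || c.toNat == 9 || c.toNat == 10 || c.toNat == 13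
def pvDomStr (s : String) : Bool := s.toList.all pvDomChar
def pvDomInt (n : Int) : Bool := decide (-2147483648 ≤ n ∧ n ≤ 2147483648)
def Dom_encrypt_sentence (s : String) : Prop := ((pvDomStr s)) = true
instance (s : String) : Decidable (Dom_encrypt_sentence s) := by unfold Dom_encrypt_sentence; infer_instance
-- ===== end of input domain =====

-- B replaces split/index-loop/join by one streaming character pass with online
-- classification into per-word accumulators (alternative decomposition, same cost).

-- ===== PORT A =====
-- vowels = "aeiouAEIOU" (the same local constant in both Pythons)
def pvVowels : List Char := "aeiouAEIOU".toList

def encrypt_sentence (s : String) : String :=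
  let words := PySem.Str.split₀ s
  let words :=
    (PySem.List.pyRange 0 words.length 1).foldl (fun ws i =>
      if i % 2 == 0 then
        PySem.List.pySetD ws i ((PySem.Str.slice? (PySem.List.pyGetD ws i "") none none (-1)).getD "")
      else
        let consonants := (PySem.List.pyGetD ws i "").toList.filter (fun c => !(pvVowels.contains c))
        let vowels_in_word := (PySem.List.pyGetD ws i "").toList.filter (fun c => pvVowels.contains c)
        PySem.List.pySetD ws i (String.ofList (consonants ++ vowels_in_word))) words
  PySem.Str.join " " words

-- ===== PORT B =====
-- B's streaming loop: state (rev, cons, vow, in_word, even, out), one step per character.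
-- A flushed word is ''.join(reversed(rev)) for an even-indexed word, ''.join(cons + vow) for an odd one.
def pvFlush (rev cons vow : List Char) (even : Bool) : String :=
  if even then String.ofList rev.reverse else String.ofList (cons ++ vow)

def pvBgo : List Char → List Char → List Char → List Char → Bool → Bool → List String → List String
  | [], rev, cons, vow, in_word, even, out =>
      if in_word then out ++ [pvFlush rev cons vow even] else out
  | ch :: rest, rev, cons, vow, in_word, even, out =>
      if PySem.Chars.isspace ch then
        if in_word then
          pvBgo rest [] [] [] false (!even) (out ++ [pvFlush rev cons vow even])
        else
          pvBgo rest rev cons vow in_word even out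
      else
        if even then
          pvBgo rest (rev ++ [ch]) cons vow true even out
        else if pvVowels.contains ch then
          pvBgo rest rev cons (vow ++ [ch]) true even out
        else
          pvBgo rest rev (cons ++ [ch]) vow true even out

def encrypt_sentence_alt (s : String) : String :=
  PySem.Str.join " " (pvBgo s.toList [] [] [] false true [])

-- ===== PRECONDITION & SPEC =====
def Spec_encrypt_sentence (s : String) (out : String) : Prop := out = encrypt_sentence_alt s
instance (s : String) (out : String) : Decidable (Spec_encrypt_sentence s out) := by unfold Spec_encrypt_sentence; infer_instance

-- ===== CLAIM (what is proved, stated in full; the proofs are below) =====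
def Claim_equal_encrypt_sentence : Prop := ∀ (s : String), Dom_encrypt_sentence s → Spec_encrypt_sentence s (encrypt_sentence s)

-- ===== LEMMAS AND PROOFS =====

-- the per-word transform computed by A's loop body at index i
def pvStep (i : Int) (w : String) : String :=
  if i % 2 == 0 then (PySem.Str.slice? w none none (-1)).getD ""
  else String.ofList (w.toList.filter (fun c => !(pvVowels.contains c)) ++
                      w.toList.filter (fun c => pvVowels.contains c))

-- the same transform indexed by a parity flag instead of an index, on char lists
def pvTransform : Bool → List (List Char) → List String
  | _, [] => []
  | e, w :: ws =>
      (if e then String.ofList w.reverse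
       else String.ofList (w.filter (fun c => !(pvVowels.contains c)) ++
                           w.filter (fun c => pvVowels.contains c))) :: pvTransform (!e) ws

-- A's in-place index loop is the map of pvStep over the enumerated word list
lemma loop_eq_map :
    ∀ (cur done : List String),
    (PySem.List.pyRange (done.length : Int) (((done.length + cur.length : Nat) : Int)) 1).foldl
      (fun ws i =>
        if i % 2 == 0 then
          PySem.List.pySetD ws i ((PySem.Str.slice? (PySem.List.pyGetD ws i "") none none (-1)).getD "")
        else
          let consonants := (PySem.List.pyGetD ws i "").toList.filter (fun c => !(pvVowels.contains c))
          let vowels_in_word := (PySem.List.pyGetD ws i "").toList.filter (fun c => pvVowels.contains c)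
          PySem.List.pySetD ws i (String.ofList (consonants ++ vowels_in_word))) (done ++ cur) =
      done ++ (PySem.List.enumerate cur (done.length : Int)).map (fun p => pvStep p.1 p.2) := by
  intro cur
  induction cur with
  | nil =>
    intro done
    simp [PySem.List.enumerate]
  | cons c rest ih =>
    intro done
    have hlt : (done.length : Int) < ((done.length + (c :: rest).length : Nat) : Int) := by
      rw [Nat.cast_lt]; simp
    rw [PySem.List.pyRange_one_cons hlt, List.foldl_cons]
    have hget : PySem.List.pyGetD (done ++ c :: rest) (done.length : Int) "" = c := by
      simp [PySem.List.pyGetD_natCast, List.getD_eq_getElem?_getD]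
    have hset : ∀ v : String, PySem.List.pySetD (done ++ c :: rest) (done.length : Int) v =
        (done ++ [v]) ++ rest := by
      intro v
      rw [PySem.List.pySetD_of_nonneg _ _ (by positivity), Int.toNat_natCast]
      simp
    by_cases hpar : ((done.length : Int) % 2 == 0) = true
    · rw [if_pos hpar, hget, hset]
      rw [show ((done.length : Int) + 1) =
            (((done ++ [(PySem.Str.slice? c none none (-1)).getD ""]).length : Nat) : Int) by simp,
          show (((done.length + (c :: rest).length : Nat)) : Int) =
            (((done ++ [(PySem.Str.slice? c none none (-1)).getD ""]).length + rest.length : Nat) : Int) by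
            push_cast [List.length_append, List.length_cons, List.length_nil]; omega,
          ih (done ++ [(PySem.Str.slice? c none none (-1)).getD ""])]
      have he : (done.length : Int) % 2 = 0 := by simpa using hpar
      simp [PySem.List.enumerate_cons, pvStep, List.append_assoc]
      intro h1
      omega
    · rw [if_neg hpar, hget]
      rw [hset (String.ofList (c.toList.filter (fun ch => !(pvVowels.contains ch)) ++
            c.toList.filter (fun ch => pvVowels.contains ch)))]
      rw [show ((done.length : Int) + 1) =
            (((done ++ [String.ofList (c.toList.filter (fun ch => !(pvVowels.contains ch)) ++
              c.toList.filter (fun ch => pvVowels.contains ch))]).length : Nat) : Int) by simp,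
          show (((done.length + (c :: rest).length : Nat)) : Int) =
            (((done ++ [String.ofList (c.toList.filter (fun ch => !(pvVowels.contains ch)) ++
              c.toList.filter (fun ch => pvVowels.contains ch))]).length + rest.length : Nat) : Int) by
            push_cast [List.length_append, List.length_cons, List.length_nil]; omega,
          ih (done ++ [String.ofList (c.toList.filter (fun ch => !(pvVowels.contains ch)) ++
            c.toList.filter (fun ch => pvVowels.contains ch))])]
      have he : ¬ ((done.length : Int) % 2 = 0) := by simpa using hpar
      simp [PySem.List.enumerate_cons, pvStep, List.append_assoc]
      intro h1
      omega

-- enumerated pvStep over words is pvTransform at the parity of the starting index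
lemma enum_step_eq_transform :
    ∀ (ws : List (List Char)) (k : Nat),
    (PySem.List.enumerate (ws.map String.ofList) (k : Int)).map (fun p => pvStep p.1 p.2) =
      pvTransform (k % 2 == 0) ws := by
  intro ws
  induction ws with
  | nil => intro k; simp [pvTransform]
  | cons w rest ih =>
    intro k
    rw [List.map_cons, PySem.List.enumerate_cons, List.map_cons]
    have hk1 : ((k : Int) + 1) = ((k + 1 : Nat) : Int) := by push_cast; ring
    rw [hk1, ih (k + 1)]
    have hpar : ((k + 1) % 2 == 0) = !(k % 2 == 0) := by
      rcases Nat.mod_two_eq_zero_or_one k with h | h <;>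
        simp [Nat.add_mod, h]
    rw [hpar]
    conv_rhs => rw [pvTransform]
    congr 1
    have hmod : ((k : Int) % 2 == 0) = (k % 2 == 0) := by
      have h2 : (k : Int) % 2 = ((k % 2 : Nat) : Int) := by omega
      rcases Nat.mod_two_eq_zero_or_one k with h | h <;> rw [h2, h] <;> decide
    show pvStep (k : Int) (String.ofList w) = _
    unfold pvStep
    rw [hmod]
    by_cases h : (k % 2 == 0) = true
    · simp [h, PySem.Str.slice?_none_none_neg_one]
    · simp [h]

-- one-step unfoldings of split₀.go (definitional)
lemma split_go_nil (cur : List Char) (acc : List (List Char)) :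
    PySem.Chars.split₀.go [] cur acc =
      if cur.isEmpty then acc.reverse else (cur.reverse :: acc).reverse := rfl

lemma split_go_cons (c : Char) (rest cur : List Char) (acc : List (List Char)) :
    PySem.Chars.split₀.go (c :: rest) cur acc =
      if PySem.Chars.isspace c then
        (if cur.isEmpty then PySem.Chars.split₀.go rest [] acc
         else PySem.Chars.split₀.go rest [] (cur.reverse :: acc))
      else PySem.Chars.split₀.go rest (c :: cur) acc := rfl

-- split₀.go's accumulator just prepends the already-found words
lemma split_go_acc :
    ∀ (chars cur : List Char) (acc : List (List Char)),
    PySem.Chars.split₀.go chars cur acc = acc.reverse ++ PySem.Chars.split₀.go chars cur [] := by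
  intro chars
  induction chars with
  | nil =>
    intro cur acc
    rw [split_go_nil, split_go_nil]
    by_cases h : cur.isEmpty <;> simp [h]
  | cons c rest ih =>
    intro cur acc
    rw [split_go_cons, split_go_cons]
    by_cases hs : PySem.Chars.isspace c
    · by_cases h : cur.isEmpty
      · simp only [hs, h, if_true]
        exact ih [] acc
      · simp only [hs, h, if_true, if_false, Bool.false_eq_true]
        rw [ih [] (cur.reverse :: acc), ih [] ([cur.reverse])]
        simp
    · simp only [hs, Bool.false_eq_true, if_false]
      exact ih (c :: cur) acc

-- B's streaming loop computes pvTransform of split₀'s word list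
lemma bgo_spec :
    ∀ (chars cur : List Char) (even : Bool) (out : List String),
    pvBgo chars (if even then cur.reverse else [])
      (if even then [] else cur.reverse.filter (fun c => !(pvVowels.contains c)))
      (if even then [] else cur.reverse.filter (fun c => pvVowels.contains c))
      (!cur.isEmpty) even out =
      out ++ pvTransform even (PySem.Chars.split₀.go chars cur []) := by
  intro chars
  induction chars with
  | nil =>
    intro cur even out
    rw [split_go_nil]
    cases cur with
    | nil => simp [pvBgo, pvTransform]
    | cons x xs =>
      simp only [List.isEmpty_cons, Bool.not_false, pvBgo, if_true, List.reverse_nil]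
      cases even <;>
        simp [pvFlush, pvTransform]
  | cons c rest ih =>
    intro cur even out
    rw [split_go_cons]
    by_cases hs : PySem.Chars.isspace c
    · cases cur with
      | nil =>
        simp only [List.isEmpty_nil, Bool.not_true, pvBgo, hs, if_true, Bool.false_eq_true,
          if_false]
        have := ih [] even out
        simpa using this
      | cons x xs =>
        simp only [List.isEmpty_cons, Bool.not_false, pvBgo, hs, if_true]
        rw [split_go_acc rest [] [(x :: xs).reverse]]
        have := ih [] (!even) (out ++ [pvFlush (if even then (x :: xs).reverse else [])
          (if even then [] else (x :: xs).reverse.filter (fun ch => !(pvVowels.contains ch)))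
          (if even then [] else (x :: xs).reverse.filter (fun ch => pvVowels.contains ch)) even])
        simp only [List.isEmpty_nil, Bool.not_true, List.reverse_nil, List.filter_nil, ite_self] at this
        rw [this]
        cases even <;>
          simp [pvFlush, pvTransform, List.append_assoc]
    · cases heven : even with
      | true =>
        simp only [if_true, pvBgo, hs, Bool.false_eq_true, if_false]
        have := ih (c :: cur) true out
        simpa using this
      | false =>
        simp only [Bool.false_eq_true, if_false, pvBgo, hs]
        by_cases hv : pvVowels.contains c
        · simp only [hv, if_true]
          have := ih (c :: cur) false out
          simp only [Bool.false_eq_true, if_false, List.isEmpty_cons, Bool.not_false,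
            List.reverse_cons, List.filter_append, List.filter_cons, hv, Bool.not_true] at this
          simpa using this
        · simp only [hv, Bool.false_eq_true, if_false]
          have := ih (c :: cur) false out
          simp only [Bool.false_eq_true, if_false, List.isEmpty_cons, Bool.not_false,
            List.reverse_cons, List.filter_append, List.filter_cons, hv, Bool.not_false] at this
          simpa using this


-- ===== VERDICT (by name: the statement is the Claim_ definition above) =====
theorem encrypt_sentence_spec : Claim_equal_encrypt_sentence := by
  intro s _
  unfold Spec_encrypt_sentence
  have hA : encrypt_sentence s = PySem.Str.join " "
      ((PySem.List.pyRange 0 ((PySem.Str.split₀ s).length : Int) 1).foldl (fun ws i =>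
        if i % 2 == 0 then
          PySem.List.pySetD ws i ((PySem.Str.slice? (PySem.List.pyGetD ws i "") none none (-1)).getD "")
        else
          let consonants := (PySem.List.pyGetD ws i "").toList.filter (fun c => !(pvVowels.contains c))
          let vowels_in_word := (PySem.List.pyGetD ws i "").toList.filter (fun c => pvVowels.contains c)
          PySem.List.pySetD ws i (String.ofList (consonants ++ vowels_in_word))) (PySem.Str.split₀ s)) := rfl
  have h := loop_eq_map (PySem.Str.split₀ s) []
  simp only [List.length_nil, Nat.cast_zero, List.nil_append, zero_add] at h
  rw [hA, h]
  have hB := bgo_spec s.toList [] true []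
  simp only [if_pos, List.isEmpty_nil, Bool.not_true, List.nil_append, List.reverse_nil] at hB
  unfold encrypt_sentence_alt
  rw [show PySem.Chars.split₀.go s.toList [] [] = PySem.Chars.split₀ s.toList from rfl] at hB
  rw [hB]
  congr 1
  rw [show PySem.Str.split₀ s = (PySem.Chars.split₀ s.toList).map String.ofList from rfl]
  have := enum_step_eq_transform (PySem.Chars.split₀ s.toList) 0
  simpa using this
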